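-- pv_equiv track=rewrite | github.com/483759/AlgorithmSolutionStorage | python/17678.py | busSimulation
-- ===== SOURCE A (Python) =====
-- def busSimulation(bustime, timetable, m, conn):
--     idx=0       #현재 탈 수 있는 크루를 가리키는 인덱스
--     for bus in bustime:     #버스 시간표에 있는 모든 버스에 대해
--         for i in range(idx,idx+m):      #한 번에 최대 m명 탑승
--             if i>=len(timetable):break      #인덱스 벗어나면 그만
--             if timetable[i]<=bus:       #버스 시간 이하이면 탈 수 있다
--                 idx+=1
--                 if timetable[i]==conn:     #콘이 탑승했다면
--                     if i==len(timetable)-1 or (i!=len(timetable)-1 and timetable[i+1]!=conn):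
--                         #가장 마지막에 탑승했거나
--                         #다음 크루의 시간이 콘의 시간과 다를 경우에만(중복 시간이 있을 경우 콘이 가장 마지막이기 때문에)
--                         return True
--     return False
-- ===== SOURCE B (Python) =====
-- def busSimulation(bustime, timetable, m, conn):
--     n = len(timetable)
--     # Phase 1: boarding trajectory only — idxs[k] = number of crews boarded before bus k.
--     idxs = [0]
--     for bus in bustime:
--         lo = idxs[-1]
--         idxs.append(lo + sum(1 for i in range(lo, min(lo + m, n)) if timetable[i] <= bus))
--     # Phase 2: positions where Con would be the one boarding (end of a run of conn).
--     spots = [i for i in range(n) if timetable[i] == conn and (i == n - 1 or timetable[i + 1] != conn)]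
--     # Phase 3: Con boards iff some such spot falls inside a qualifying bus window.
--     return any(lo <= i < lo + m and timetable[i] <= bus
--                for i in spots
--                for lo, bus in zip(idxs, bustime))
-- ===== Notes on version B (the rewrite author's own statement) =====
-- stated objective: alternative
-- what changed: B replaces A's interleaved simulation-with-inline-detection by three independent phases: computing only the idx trajectory (boarded counts before each bus), precomputing the list of run-ending conn positions, and then a separate product test whether any such position falls inside a qualifying (window, bus) pair of the trajectory; A tests and early-returns inside the nested per-seat boarding loop.
import Mathlib
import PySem

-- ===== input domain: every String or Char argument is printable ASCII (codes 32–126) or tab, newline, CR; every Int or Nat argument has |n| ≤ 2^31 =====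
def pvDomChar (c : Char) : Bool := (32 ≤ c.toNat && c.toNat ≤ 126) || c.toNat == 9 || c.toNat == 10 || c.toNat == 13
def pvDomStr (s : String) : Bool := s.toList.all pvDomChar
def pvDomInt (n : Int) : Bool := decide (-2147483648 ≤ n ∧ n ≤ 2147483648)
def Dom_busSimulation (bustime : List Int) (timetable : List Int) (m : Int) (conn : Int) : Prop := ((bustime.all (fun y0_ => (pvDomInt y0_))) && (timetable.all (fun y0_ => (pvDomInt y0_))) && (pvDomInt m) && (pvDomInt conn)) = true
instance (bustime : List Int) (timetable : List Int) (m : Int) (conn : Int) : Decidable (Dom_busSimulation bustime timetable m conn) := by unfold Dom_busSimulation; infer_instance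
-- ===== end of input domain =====

-- B re-decomposes A into three independent phases (idx trajectory, run-ending conn
-- positions, and a product window-membership test) instead of A's interleaved
-- simulation with inline early-return; same result proved on every input.

-- ===== PORT A =====
-- inner 'for i in range(idx, idx+m)' loop; fuel = number of remaining range elements;
-- 'none' = the Python 'return True', 'some idx' = loop finished with this idx.
def pvInnerA (t : List Int) (bus conn : Int) : Nat → Int → Int → Option Int
  | 0, _, idx => some idx
  | fuel+1, i, idx =>
    if (t.length : Int) ≤ i then some idx            -- if i>=len(timetable): break
    else if (PySem.List.pyGet? t i).getD 0 ≤ bus then  -- index i is in range here, so getD 0 is exact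
      if ((PySem.List.pyGet? t i).getD 0 == conn &&
          (i == (t.length : Int) - 1 ||
            (i != (t.length : Int) - 1 && (PySem.List.pyGet? t (i+1)).getD 0 != conn))) then
        none                                          -- return True
      else pvInnerA t bus conn fuel (i+1) (idx+1)
    else pvInnerA t bus conn fuel (i+1) idx

-- outer 'for bus in bustime' loop with early return
def pvOuterA (t : List Int) (m conn : Int) : List Int → Int → Bool
  | [], _ => false
  | bus :: rest, idx =>
    match pvInnerA t bus conn m.toNat idx idx with
    | none => true
    | some idx' => pvOuterA t m conn rest idx'

def busSimulation (bustime : List Int) (timetable : List Int) (m : Int) (conn : Int) : Bool :=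
  pvOuterA timetable m conn bustime 0

-- ===== PORT B =====
-- sum(1 for i in range(lo, min(lo+m, n)) if timetable[i] <= bus)
def pvCountB (t : List Int) (bus m lo : Int) : Int :=
  (PySem.List.pyRange lo (min (lo + m) (t.length : Int)) 1).foldl
    (fun acc i => if (PySem.List.pyGet? t i).getD 0 ≤ bus then acc + 1 else acc) 0

-- phase 1 fused with the zip of phase 3: the (lo, bus) pairs, lo = idxs[k]
def pvPairsB (t : List Int) (m : Int) : List Int → Int → List (Int × Int)
  | [], _ => []
  | bus :: rest, lo => (lo, bus) :: pvPairsB t m rest (lo + pvCountB t bus m lo)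

-- phase 2: [i for i in range(n) if timetable[i] == conn and (i == n-1 or timetable[i+1] != conn)]
def pvSpotsB (t : List Int) (conn : Int) : List Int :=
  (PySem.List.pyRange 0 (t.length : Int) 1).filter (fun i =>
    (PySem.List.pyGet? t i).getD 0 == conn &&
      (i == (t.length : Int) - 1 || (PySem.List.pyGet? t (i+1)).getD 0 != conn))

def busSimulation_alt (bustime : List Int) (timetable : List Int) (m : Int) (conn : Int) : Bool :=
  -- phase 3: any(lo <= i < lo+m and timetable[i] <= bus for i in spots for lo,bus in pairs)
  (pvSpotsB timetable conn).any (fun i =>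
    (pvPairsB timetable m bustime 0).any (fun p =>
      decide (p.1 ≤ i ∧ i < p.1 + m) && decide ((PySem.List.pyGet? timetable i).getD 0 ≤ p.2)))

-- ===== PRECONDITION & SPEC =====
def Spec_busSimulation (bustime : List Int) (timetable : List Int) (m : Int) (conn : Int) (out : Bool) : Prop := out = busSimulation_alt bustime timetable m conn
instance (bustime : List Int) (timetable : List Int) (m : Int) (conn : Int) (out : Bool) : Decidable (Spec_busSimulation bustime timetable m conn out) := by unfold Spec_busSimulation; infer_instance

-- ===== CLAIM =====
def Claim_equal_busSimulation : Prop := ∀ (bustime : List Int) (timetable : List Int) (m : Int) (conn : Int), Dom_busSimulation bustime timetable m conn → Spec_busSimulation bustime timetable m conn (busSimulation bustime timetable m conn)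

-- ===== LEMMAS AND PROOFS =====
-- A's early-return test and B's spot predicate, for the proofs below
def pvPA (t : List Int) (conn i : Int) : Bool :=
  (PySem.List.pyGet? t i).getD 0 == conn &&
    (i == (t.length : Int) - 1 ||
      (i != (t.length : Int) - 1 && (PySem.List.pyGet? t (i+1)).getD 0 != conn))

def pvPB (t : List Int) (conn i : Int) : Bool :=
  (PySem.List.pyGet? t i).getD 0 == conn &&
    (i == (t.length : Int) - 1 || (PySem.List.pyGet? t (i+1)).getD 0 != conn)

-- the qualifying window at (lo, bus), used only in proofs
def pvW (t : List Int) (bus m lo : Int) : List Int :=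
  (PySem.List.pyRange lo (min (lo + m) (t.length : Int)) 1).filter
    (fun i => decide ((PySem.List.pyGet? t i).getD 0 ≤ bus))

lemma pvPA_eq_pvPB (t : List Int) (conn i : Int) : pvPA t conn i = pvPB t conn i := by
  unfold pvPA pvPB
  cases (PySem.List.pyGet? t i).getD 0 == conn <;>
    cases h : (i == (t.length : Int) - 1) <;>
      simp [bne, h]

-- A's inner loop equals: detect pvPA on the window, else advance idx by the window length
lemma pvInnerA_eq (t : List Int) (bus conn : Int) :
    ∀ (fuel : Nat) (i idx : Int),
      pvInnerA t bus conn fuel i idx =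
        (if ((PySem.List.pyRange i (min (i + (fuel : Int)) (t.length : Int)) 1).filter
              (fun j => decide ((PySem.List.pyGet? t j).getD 0 ≤ bus))).any (pvPA t conn)
         then none
         else some (idx + ((PySem.List.pyRange i (min (i + (fuel : Int)) (t.length : Int)) 1).filter
              (fun j => decide ((PySem.List.pyGet? t j).getD 0 ≤ bus))).length)) := by
  intro fuel
  induction fuel with
  | zero =>
    intro i idx
    rw [PySem.List.pyRange_one_eq_nil (by omega : min (i + ((0:Nat) : Int)) (t.length : Int) ≤ i)]
    simp [pvInnerA]
  | succ fuel ih =>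
    intro i idx
    by_cases hn : (t.length : Int) ≤ i
    · rw [PySem.List.pyRange_one_eq_nil (by omega : min (i + ((fuel+1 : Nat) : Int)) (t.length : Int) ≤ i)]
      simp [pvInnerA, hn]
    · have hcons : PySem.List.pyRange i (min (i + ((fuel+1 : Nat) : Int)) (t.length : Int)) 1
          = i :: PySem.List.pyRange (i+1) (min (i + ((fuel+1 : Nat) : Int)) (t.length : Int)) 1 :=
        PySem.List.pyRange_one_cons (by push_cast; omega)
      have hmin : min (i + ((fuel+1 : Nat) : Int)) (t.length : Int)
          = min ((i+1) + ((fuel : Nat) : Int)) (t.length : Int) := by push_cast; omega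
      rw [hcons, hmin]
      simp only [pvInnerA, if_neg hn]
      by_cases hb : (PySem.List.pyGet? t i).getD 0 ≤ bus
      · rw [if_pos hb, List.filter_cons_of_pos (by simpa using hb), List.any_cons]
        rw [show ((PySem.List.pyGet? t i).getD 0 == conn &&
              (i == (t.length : Int) - 1 ||
                (i != (t.length : Int) - 1 && (PySem.List.pyGet? t (i+1)).getD 0 != conn)))
            = pvPA t conn i from rfl]
        by_cases hP : pvPA t conn i = true
        · rw [if_pos hP]
          simp [hP]
        · have hPf : pvPA t conn i = false := by simpa using hP
          rw [if_neg hP, ih (i+1) (idx+1)]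
          simp only [hPf, Bool.false_or, List.length_cons]
          split_ifs with hc
          · rfl
          · congr 1; push_cast; omega
      · rw [if_neg hb, ih (i+1) idx, List.filter_cons_of_neg (by simpa using hb)]

-- A's fuel window (upper bound i + m.toNat) is the window with upper bound i + m
lemma pvWindow_fuel_eq (t : List Int) (bus m idx : Int) :
    (PySem.List.pyRange idx (min (idx + ((m.toNat : Nat) : Int)) (t.length : Int)) 1).filter
      (fun j => decide ((PySem.List.pyGet? t j).getD 0 ≤ bus)) = pvW t bus m idx := by
  unfold pvW
  by_cases hm : 0 ≤ m
  · rw [Int.toNat_of_nonneg hm]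
  · rw [PySem.List.pyRange_one_eq_nil (by omega : min (idx + ((m.toNat : Nat) : Int)) (t.length : Int) ≤ idx),
      PySem.List.pyRange_one_eq_nil (by omega : min (idx + m) (t.length : Int) ≤ idx)]

-- B's count is the window's length
lemma pvCountB_eq_length (t : List Int) (bus m lo : Int) :
    pvCountB t bus m lo = ((pvW t bus m lo).length : Int) := by
  unfold pvCountB pvW
  generalize PySem.List.pyRange lo (min (lo + m) (t.length : Int)) 1 = l
  suffices h : ∀ (l : List Int) (acc : Int),
      l.foldl (fun acc i => if (PySem.List.pyGet? t i).getD 0 ≤ bus then acc + 1 else acc) acc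
        = acc + ((l.filter (fun i => decide ((PySem.List.pyGet? t i).getD 0 ≤ bus))).length : Int) by
    simpa using h l 0
  intro l
  induction l with
  | nil => intro acc; simp
  | cons x xs ih =>
    intro acc
    by_cases hx : (PySem.List.pyGet? t x).getD 0 ≤ bus
    · rw [List.foldl_cons, if_pos hx, List.filter_cons_of_pos (by simp [hx]), ih]
      simp only [List.length_cons]
      push_cast; ring
    · rw [List.foldl_cons, if_neg hx, List.filter_cons_of_neg (by simp [hx])]
      exact ih acc

-- detection on one window equals the spot-membership test for that (lo, bus) pair
lemma pvWindow_any_eq (t : List Int) (conn bus m lo : Int) (hlo : 0 ≤ lo) :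
    (pvW t bus m lo).any (pvPB t conn) =
      (pvSpotsB t conn).any (fun i =>
        decide (lo ≤ i ∧ i < lo + m) && decide ((PySem.List.pyGet? t i).getD 0 ≤ bus)) := by
  unfold pvW pvSpotsB pvPB
  rw [Bool.eq_iff_iff]
  simp only [List.any_eq_true, List.mem_filter, PySem.List.mem_pyRange_one,
    Bool.and_eq_true, decide_eq_true_eq]
  constructor
  · rintro ⟨i, ⟨⟨h1, h2⟩, hb⟩, hP⟩
    exact ⟨i, ⟨⟨by omega, by omega⟩, hP⟩, ⟨by omega, by omega⟩, hb⟩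
  · rintro ⟨i, ⟨⟨h0, hn⟩, hP⟩, ⟨h1, h2⟩, hb⟩
    exact ⟨i, ⟨⟨h1, by omega⟩, hb⟩, hP⟩

lemma any_or_split {α : Type} (l : List α) (f g : α → Bool) :
    l.any (fun x => f x || g x) = (l.any f || l.any g) := by
  induction l with
  | nil => rfl
  | cons x xs ih =>
    cases hf : f x
    · simp only [List.any_cons, hf, Bool.false_or, ih]
      cases g x <;> cases xs.any f <;> simp
    · simp [List.any_cons, hf]

-- main invariant: A's outer loop = B's spot × trajectory detection
lemma pvOuterA_eq (t : List Int) (m conn : Int) :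
    ∀ (buses : List Int) (idx : Int), 0 ≤ idx →
      pvOuterA t m conn buses idx =
        (pvSpotsB t conn).any (fun i =>
          (pvPairsB t m buses idx).any (fun p =>
            decide (p.1 ≤ i ∧ i < p.1 + m) && decide ((PySem.List.pyGet? t i).getD 0 ≤ p.2))) := by
  intro buses
  induction buses with
  | nil => intro idx _; simp [pvOuterA, pvPairsB]
  | cons bus rest ih =>
    intro idx hidx
    have hfun : pvPA t conn = pvPB t conn := funext (pvPA_eq_pvPB t conn)
    simp only [pvOuterA, pvInnerA_eq, pvWindow_fuel_eq]
    simp only [pvPairsB, List.any_cons]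
    rw [any_or_split]
    rw [← pvWindow_any_eq t conn bus m idx hidx]
    have hrec : pvOuterA t m conn rest (idx + ((pvW t bus m idx).length : Int))
        = (pvSpotsB t conn).any (fun i =>
            (pvPairsB t m rest (idx + pvCountB t bus m idx)).any (fun p =>
              decide (p.1 ≤ i ∧ i < p.1 + m) && decide ((PySem.List.pyGet? t i).getD 0 ≤ p.2))) := by
      rw [pvCountB_eq_length]
      exact ih _ (by positivity)
    by_cases h : (pvW t bus m idx).any (pvPA t conn) = true
    · have h' : (pvW t bus m idx).any (pvPB t conn) = true := by rw [← hfun]; exact h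
      simp [h, h']
    · have h' : (pvW t bus m idx).any (pvPB t conn) = false := by
        rw [← hfun]; simpa using h
      have hf : (pvW t bus m idx).any (pvPA t conn) = false := by simpa using h
      simp only [hf, if_false, Bool.false_eq_true, h', Bool.false_or]
      exact hrec

-- ===== VERDICT =====
theorem busSimulation_spec : Claim_equal_busSimulation := by
  intro bustime timetable m conn _
  unfold Spec_busSimulation busSimulation busSimulation_alt
  rw [pvOuterA_eq timetable m conn bustime 0 le_rfl]
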